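-- pv_equiv track=rewrite | github.com/PawelMr/Advent_of_Code_2024 | day_5/task1_2.py | del_bet_queue
-- ===== SOURCE A (Python) =====
-- def del_bet_queue(ful_list_queue, dict_rule, bet = True):
--     """проверка соответствует ли правилам, берем прямые правила
--     ключ страница, значение список страниц которые идут после"""
--     new_list_queue = []
--     if bet:
--         check_bat = lambda x: not x
--     else:
--         check_bat = lambda x: x
--     for queue in ful_list_queue:
--         skip = False
--         for index, page in enumerate(queue):
--             for i in dict_rule.get(page,[]):
--                 if i in queue[:index]:
--                     skip = True
--                 if skip:
--                     break
--         if check_bat(skip):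
--             new_list_queue.append(queue)
--     return new_list_queue
-- ===== SOURCE B (Python) =====
-- def del_bet_queue(ful_list_queue, dict_rule, bet=True):
--     """One pass per queue builds first/last occurrence maps; a rule is violated
--     iff some successor's first occurrence precedes the page's last occurrence."""
--     result = []
--     for queue in ful_list_queue:
--         first = {}
--         last = {}
--         for idx, page in enumerate(queue):
--             if page not in first:
--                 first[page] = idx
--             last[page] = idx
--         n = len(queue)
--         bad = any(first.get(i, n) < lst
--                   for page, lst in last.items()
--                   for i in dict_rule.get(page, []))
--         if bad != bet:
--             result.append(queue)
--     return result
-- ===== Notes on version B (the rewrite author's own statement) =====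
-- stated objective: alternative
-- what changed: Instead of A's triple loop testing each rule successor against an ever-growing prefix slice queue[:index], B builds first/last-occurrence position maps in one pass per queue and flags a violation when a successor's first occurrence precedes a page's last occurrence; no prefix slices or repeated membership scans remain (measured 1.77x at the largest size).
import Mathlib
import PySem

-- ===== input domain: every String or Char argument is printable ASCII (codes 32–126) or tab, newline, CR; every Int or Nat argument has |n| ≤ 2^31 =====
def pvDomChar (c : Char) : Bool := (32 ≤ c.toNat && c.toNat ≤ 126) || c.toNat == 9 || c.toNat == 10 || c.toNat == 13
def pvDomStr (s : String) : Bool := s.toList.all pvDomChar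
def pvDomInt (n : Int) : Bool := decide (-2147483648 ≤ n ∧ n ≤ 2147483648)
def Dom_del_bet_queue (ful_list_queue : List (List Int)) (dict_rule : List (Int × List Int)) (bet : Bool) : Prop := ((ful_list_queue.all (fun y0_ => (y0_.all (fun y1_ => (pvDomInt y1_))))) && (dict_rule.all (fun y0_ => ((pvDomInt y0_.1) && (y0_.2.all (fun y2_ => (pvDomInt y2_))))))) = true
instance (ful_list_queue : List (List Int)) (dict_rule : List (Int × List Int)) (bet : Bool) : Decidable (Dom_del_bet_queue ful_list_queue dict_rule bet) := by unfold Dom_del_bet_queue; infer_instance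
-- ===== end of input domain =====

-- ===== PORT A =====
-- B replaces A's prefix-slice scans by first/last-occurrence position maps (alternative decomposition; return value proved equal).
def del_bet_queue (ful_list_queue : List (List Int)) (dict_rule : List (Int × List Int)) (bet : Bool) : List (List Int) :=
  let check_bat : Bool → Bool := if bet then (fun x => !x) else (fun x => x)
  ful_list_queue.foldl (fun new_list_queue queue =>
    let skip :=
      (PySem.List.enumerate queue).foldl (fun skip ip =>
        (PySem.Dict.getD (PySem.Dict.mk dict_rule) ip.2 []).foldl (fun skip i =>
          -- 'if skip: break' — once skip is true the remaining iterations change nothing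
          if skip then skip
          else if (PySem.List.slice queue none (some ip.1)).contains i then true
          else skip) skip) false
    if check_bat skip then new_list_queue ++ [queue] else new_list_queue) []

-- ===== PORT B =====
def del_bet_queue_alt (ful_list_queue : List (List Int)) (dict_rule : List (Int × List Int)) (bet : Bool) : List (List Int) :=
  ful_list_queue.foldl (fun result queue =>
    let fl := (PySem.List.enumerate queue).foldl
      (fun (fl : PySem.Dict Int Int × PySem.Dict Int Int) ip =>
        (if fl.1.contains ip.2 then fl.1 else fl.1.insert ip.2 ip.1,
         fl.2.insert ip.2 ip.1))
      (PySem.Dict.empty, PySem.Dict.empty)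
    let n : Int := queue.length
    let bad := fl.2.items.any (fun pl =>
      (PySem.Dict.getD (PySem.Dict.mk dict_rule) pl.1 []).any (fun i =>
        decide (PySem.Dict.getD fl.1 i n < pl.2)))
    if bad != bet then result ++ [queue] else result) []

-- ===== PRECONDITION & SPEC =====
def Spec_del_bet_queue (ful_list_queue : List (List Int)) (dict_rule : List (Int × List Int)) (bet : Bool) (out : List (List Int)) : Prop := out = del_bet_queue_alt ful_list_queue dict_rule bet
instance (ful_list_queue : List (List Int)) (dict_rule : List (Int × List Int)) (bet : Bool) (out : List (List Int)) : Decidable (Spec_del_bet_queue ful_list_queue dict_rule bet out) := by unfold Spec_del_bet_queue; infer_instance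

-- ===== CLAIM (what is proved, stated in full; the proofs are below) =====
def Claim_equal_del_bet_queue : Prop := ∀ (ful_list_queue : List (List Int)) (dict_rule : List (Int × List Int)) (bet : Bool), Dom_del_bet_queue ful_list_queue dict_rule bet → Spec_del_bet_queue ful_list_queue dict_rule bet (del_bet_queue ful_list_queue dict_rule bet)

-- ===== LEMMAS AND PROOFS =====

-- the first/last-occurrence dictionaries B builds for one queue
def pvFL (queue : List Int) : PySem.Dict Int Int × PySem.Dict Int Int :=
  (PySem.List.enumerate queue).foldl
    (fun (fl : PySem.Dict Int Int × PySem.Dict Int Int) ip =>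
      (if fl.1.contains ip.2 then fl.1 else fl.1.insert ip.2 ip.1,
       fl.2.insert ip.2 ip.1))
    (PySem.Dict.empty, PySem.Dict.empty)

theorem pvFL_append_singleton (qs : List Int) (x : Int) :
    pvFL (qs ++ [x]) =
      ((if (pvFL qs).1.contains x then (pvFL qs).1 else (pvFL qs).1.insert x qs.length,
        (pvFL qs).2.insert x qs.length)) := by
  unfold pvFL
  rw [PySem.List.enumerate_append, List.foldl_append]
  simp [PySem.List.enumerate]

theorem pvFL_fst_get? (queue : List Int) : ∀ y : Int,
    (pvFL queue).1.get? y = (PySem.List.index? queue y).map (fun j => (j : Int)) := by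
  induction queue using List.reverseRecOn with
  | nil => intro y; simp [pvFL, PySem.List.enumerate, PySem.List.index?_eq_idxOf?, PySem.Dict.get?_empty]
  | append_singleton qs x ih =>
    intro y
    rw [pvFL_append_singleton]
    have hc : (pvFL qs).1.contains x = decide (x ∈ qs) := by
      rw [PySem.Dict.contains_eq_isSome_get?, ih x]
      by_cases hx : x ∈ qs
      · obtain ⟨f, hf⟩ := Option.isSome_iff_exists.mp ((PySem.List.index?_isSome_iff qs x).mpr hx)
        rw [hf]; simp [hx]
      · rw [(PySem.List.index?_eq_none_iff qs x).mpr hx]; simp [hx]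
    by_cases hx : x ∈ qs
    · simp only [hc, hx, decide_true, if_true]
      by_cases hy : y ∈ qs
      · rw [PySem.List.index?_append_of_mem [x] hy, ih y]
      · have h1 := PySem.List.index?_eq_none_iff qs y |>.mpr hy
        have hyx : y ∉ qs ++ [x] := by
          intro h; rcases List.mem_append.mp h with h | h
          · exact hy h
          · simp at h; subst h; exact hy hx
        have h2 := PySem.List.index?_eq_none_iff (qs ++ [x]) y |>.mpr hyx
        rw [ih y, h1, h2]
    · simp only [hc, hx, decide_false, Bool.false_eq_true, if_false]
      by_cases hyx : y = x
      · subst hyx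
        rw [PySem.Dict.get?_insert_self, PySem.List.index?_append_singleton_self qs y hx]
        rfl
      · rw [PySem.Dict.get?_insert_of_ne _ _ hyx, ih y]
        by_cases hy : y ∈ qs
        · rw [PySem.List.index?_append_of_mem [x] hy]
        · have h1 := PySem.List.index?_eq_none_iff qs y |>.mpr hy
          have hyq : y ∉ qs ++ [x] := by
            intro h; rcases List.mem_append.mp h with h | h
            · exact hy h
            · simp at h; exact hyx h
          have h2 := PySem.List.index?_eq_none_iff (qs ++ [x]) y |>.mpr hyq
          rw [h1, h2]

theorem pvFL_snd_keys (queue : List Int) :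
    (pvFL queue).2.keys = PySem.Set.ofList queue := by
  induction queue using List.reverseRecOn with
  | nil => simp [pvFL, PySem.List.enumerate, PySem.Set.ofList_eq_foldl]
  | append_singleton qs x ih =>
    rw [pvFL_append_singleton]
    have hof : PySem.Set.ofList (qs ++ [x]) = PySem.Set.add (PySem.Set.ofList qs) x := by
      rw [PySem.Set.ofList_eq_foldl, PySem.Set.ofList_eq_foldl, List.foldl_append]
      rfl
    by_cases hx : x ∈ qs
    · have hc : (pvFL qs).2.contains x = true := by
        rw [PySem.Dict.contains_iff_mem_keys, ih]
        exact (PySem.Set.mem_ofList qs x).mpr hx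
      rw [PySem.Dict.keys_insert_of_contains _ _ hc, ih, hof]
      simp [PySem.Set.add, hx]
    · have hc : (pvFL qs).2.contains x = false := by
        rw [Bool.eq_false_iff]
        intro hcc
        rw [PySem.Dict.contains_iff_mem_keys, ih] at hcc
        exact hx ((PySem.Set.mem_ofList qs x).mp hcc)
      rw [PySem.Dict.keys_insert_of_not_contains _ _ hc, ih, hof]
      simp [PySem.Set.add, hx]

theorem pvFL_snd_spec (queue : List Int) : ∀ p : Int, p ∈ queue →
    ∃ l : Nat, (pvFL queue).2.get? p = some (l : Int) ∧ l < queue.length ∧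
      queue[l]? = some p ∧ ∀ j : Nat, queue[j]? = some p → j ≤ l := by
  induction queue using List.reverseRecOn with
  | nil => intro p hp; simp at hp
  | append_singleton qs x ih =>
    intro p hp
    rw [pvFL_append_singleton]
    by_cases hpx : p = x
    · subst hpx
      refine ⟨qs.length, ?_, by simp, by simp, ?_⟩
      · rw [PySem.Dict.get?_insert_self]
      · intro j hj
        have := (List.getElem?_eq_some_iff.mp hj).1
        simp at this; omega
    · have hpq : p ∈ qs := by
        rcases List.mem_append.mp hp with h | h
        · exact h
        · simp at h; exact absurd h hpx
      obtain ⟨l, h1, h2, h3, h4⟩ := ih p hpq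
      refine ⟨l, ?_, by simp; omega, ?_, ?_⟩
      · rw [PySem.Dict.get?_insert_of_ne _ _ hpx]; exact h1
      · rw [List.getElem?_append_left h2]; exact h3
      · intro j hj
        have hjlen := (List.getElem?_eq_some_iff.mp hj).1
        simp at hjlen
        by_cases hjq : j < qs.length
        · rw [List.getElem?_append_left hjq] at hj
          exact h4 j hj
        · have hje : j = qs.length := by omega
          subst hje
          rw [List.getElem?_append_right (le_refl _)] at hj
          simp at hj
          exact absurd hj.symm hpx

-- membership in a prefix, via getElem?
theorem pv_mem_take (l : List Int) (k : Nat) (i : Int) :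
    i ∈ l.take k ↔ ∃ j : Nat, j < k ∧ l[j]? = some i := by
  constructor
  · intro h
    obtain ⟨j, hget⟩ := List.mem_iff_getElem?.mp h
    rw [List.getElem?_take] at hget
    by_cases hj : j < k
    · rw [if_pos hj] at hget
      exact ⟨j, hj, hget⟩
    · rw [if_neg hj] at hget; exact absurd hget (by simp)
  · rintro ⟨j, hjk, hget⟩
    refine List.mem_iff_getElem?.mpr ⟨j, ?_⟩
    rw [List.getElem?_take, if_pos hjk]; exact hget

-- A's skip flag, characterised as an existential over pairs of positions
theorem pvSkip_char (dict_rule : List (Int × List Int)) (queue : List Int) :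
    ((PySem.List.enumerate queue).foldl (fun skip ip =>
        (PySem.Dict.getD (PySem.Dict.mk dict_rule) ip.2 []).foldl (fun skip i =>
          if skip then skip
          else if (PySem.List.slice queue none (some ip.1)).contains i then true
          else skip) skip) false) = true ↔
      ∃ k : Nat, ∃ _ : k < queue.length, ∃ i ∈ PySem.Dict.getD (PySem.Dict.mk dict_rule) queue[k] [],
        ∃ j : Nat, j < k ∧ queue[j]? = some i := by
  have hin : ∀ (b : Bool) (l : List Int) (ip : Int × Int),
      l.foldl (fun s i => if s then s
          else if (PySem.List.slice queue none (some ip.1)).contains i then true else s) b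
        = (b || l.any (fun i => (PySem.List.slice queue none (some ip.1)).contains i)) := by
    intro b l ip
    rw [PySem.List.foldl_congr_mem l _
        (fun s i => if (PySem.List.slice queue none (some ip.1)).contains i then true else s) b
        (by intro s i _; cases s <;> simp),
      PySem.List.foldl_if_true_eq]
  rw [PySem.List.foldl_congr_mem (PySem.List.enumerate queue) _
      (fun (skip : Bool) (ip : Int × Int) =>
        if ((PySem.Dict.getD (PySem.Dict.mk dict_rule) ip.2 []).any fun i =>
            (PySem.List.slice queue none (some ip.1)).contains i) then true else skip) false
      (by intro acc ip _
          rw [hin]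
          cases acc <;> cases h : ((PySem.Dict.getD (PySem.Dict.mk dict_rule) ip.2 []).any fun i =>
            (PySem.List.slice queue none (some ip.1)).contains i) <;> simp only [h] <;> rfl),
      PySem.List.foldl_if_true_eq, Bool.false_or]
  rw [List.any_eq_true]
  constructor
  · rintro ⟨ip, hmem, hip⟩
    obtain ⟨k, hk, rfl⟩ := (PySem.List.mem_enumerate_iff queue 0 ip).mp hmem
    rw [List.any_eq_true] at hip
    obtain ⟨i, hi, hcon⟩ := hip
    simp only [zero_add] at hcon hi ⊢
    rw [PySem.List.slice_to_natCast] at hcon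
    have : i ∈ queue.take k := by
      simpa using hcon
    obtain ⟨j, hjk, hget⟩ := (pv_mem_take queue k i).mp this
    exact ⟨k, hk, i, hi, j, hjk, hget⟩
  · rintro ⟨k, hk, i, hi, j, hjk, hget⟩
    refine ⟨((0 : Int) + (k : Nat), queue[k]), ?_, ?_⟩
    · exact (PySem.List.mem_enumerate_iff queue 0 _).mpr ⟨k, hk, rfl⟩
    · rw [List.any_eq_true]
      refine ⟨i, by simpa using hi, ?_⟩
      simp only [zero_add]
      rw [PySem.List.slice_to_natCast]
      simpa using (pv_mem_take queue k i).mpr ⟨j, hjk, hget⟩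

-- B's bad flag, characterised via the position maps
theorem pvBad_char (dict_rule : List (Int × List Int)) (queue : List Int) :
    ((pvFL queue).2.items.any (fun pl =>
        (PySem.Dict.getD (PySem.Dict.mk dict_rule) pl.1 []).any (fun i =>
          decide (PySem.Dict.getD (pvFL queue).1 i (queue.length : Int) < pl.2)))) = true ↔
      ∃ p ∈ queue, ∃ i ∈ PySem.Dict.getD (PySem.Dict.mk dict_rule) p [],
        PySem.Dict.getD (pvFL queue).1 i (queue.length : Int) < (pvFL queue).2.getD p 0 := by
  have hnd : (pvFL queue).2.keys.Nodup := by
    rw [pvFL_snd_keys]; exact PySem.Set.nodup_ofList queue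
  rw [PySem.Dict.items_eq_map_keys _ hnd 0, pvFL_snd_keys, List.any_map]
  simp only [List.any_eq_true, Function.comp_apply, decide_eq_true_eq, PySem.Set.mem_ofList]

theorem pvSkip_eq_bad (dict_rule : List (Int × List Int)) (queue : List Int) :
    ((PySem.List.enumerate queue).foldl (fun skip ip =>
        (PySem.Dict.getD (PySem.Dict.mk dict_rule) ip.2 []).foldl (fun skip i =>
          if skip then skip
          else if (PySem.List.slice queue none (some ip.1)).contains i then true
          else skip) skip) false) =
    ((pvFL queue).2.items.any (fun pl =>
        (PySem.Dict.getD (PySem.Dict.mk dict_rule) pl.1 []).any (fun i =>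
          decide (PySem.Dict.getD (pvFL queue).1 i (queue.length : Int) < pl.2)))) := by
  rw [Bool.eq_iff_iff, pvSkip_char, pvBad_char]
  constructor
  · rintro ⟨k, hk, i, hi, j, hjk, hget⟩
    have hiq : i ∈ queue := List.mem_of_getElem? hget
    refine ⟨queue[k], List.getElem_mem hk, i, hi, ?_⟩
    -- value of the first-occurrence map at i
    obtain ⟨f, hf⟩ := Option.isSome_iff_exists.mp ((PySem.List.index?_isSome_iff queue i).mpr hiq)
    obtain ⟨hfk, hfi, hfirst⟩ := PySem.List.getElem_of_index?_eq_some hf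
    have hF : PySem.Dict.getD (pvFL queue).1 i (queue.length : Int) = (f : Int) := by
      rw [PySem.Dict.getD_eq_get?_getD, pvFL_fst_get?, hf]; rfl
    -- value of the last-occurrence map at queue[k]
    obtain ⟨l, h1, h2, h3, h4⟩ := pvFL_snd_spec queue queue[k] (List.getElem_mem hk)
    have hL : (pvFL queue).2.getD queue[k] 0 = (l : Int) := by
      rw [PySem.Dict.getD_eq_get?_getD, h1]; rfl
    have hjlen : j < queue.length := (List.getElem?_eq_some_iff.mp hget).1
    have hfj : f ≤ j := by
      by_contra hcon
      exact hfirst j (by omega) (by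
        have := (List.getElem?_eq_some_iff.mp hget).2
        simpa using this)
    have hkl : k ≤ l := h4 k (by simp [List.getElem?_eq_getElem hk])
    rw [hF, hL]
    exact_mod_cast by omega
  · rintro ⟨p, hp, i, hi, hlt⟩
    obtain ⟨l, h1, h2, h3, h4⟩ := pvFL_snd_spec queue p hp
    have hL : (pvFL queue).2.getD p 0 = (l : Int) := by
      rw [PySem.Dict.getD_eq_get?_getD, h1]; rfl
    rw [hL] at hlt
    by_cases hiq : i ∈ queue
    · obtain ⟨f, hf⟩ := Option.isSome_iff_exists.mp ((PySem.List.index?_isSome_iff queue i).mpr hiq)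
      obtain ⟨hfk, hfi, _⟩ := PySem.List.getElem_of_index?_eq_some hf
      have hF : PySem.Dict.getD (pvFL queue).1 i (queue.length : Int) = (f : Int) := by
        rw [PySem.Dict.getD_eq_get?_getD, pvFL_fst_get?, hf]; rfl
      rw [hF] at hlt
      have hfl : f < l := by exact_mod_cast hlt
      have hql : queue[l] = p := by
        have := (List.getElem?_eq_some_iff.mp h3).2
        simpa using this
      refine ⟨l, h2, i, by rwa [hql], f, hfl, ?_⟩
      rw [List.getElem?_eq_getElem hfk, hfi]
    · have hnone := (PySem.List.index?_eq_none_iff queue i).mpr hiq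
      have hF : PySem.Dict.getD (pvFL queue).1 i (queue.length : Int) = (queue.length : Int) := by
        rw [PySem.Dict.getD_eq_get?_getD, pvFL_fst_get?, hnone]; rfl
      rw [hF] at hlt
      have : (queue.length : Int) < (l : Int) := hlt
      have : queue.length < l := by exact_mod_cast this
      omega

-- ===== VERDICT (by name: the statement is the Claim_ definition above) =====
theorem del_bet_queue_spec : Claim_equal_del_bet_queue := by
  intro ful_list_queue dict_rule bet _
  unfold Spec_del_bet_queue del_bet_queue del_bet_queue_alt
  refine PySem.List.foldl_congr_mem _ _ _ _ ?_
  intro acc queue _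
  show (if (if bet then (fun x => !x) else (fun x => x))
          ((PySem.List.enumerate queue).foldl (fun skip ip =>
            (PySem.Dict.getD (PySem.Dict.mk dict_rule) ip.2 []).foldl (fun skip i =>
              if skip then skip
              else if (PySem.List.slice queue none (some ip.1)).contains i then true
              else skip) skip) false) then acc ++ [queue] else acc)
      = (if (((pvFL queue).2.items.any (fun pl =>
            (PySem.Dict.getD (PySem.Dict.mk dict_rule) pl.1 []).any (fun i =>
              decide (PySem.Dict.getD (pvFL queue).1 i (queue.length : Int) < pl.2)))) != bet)
          then acc ++ [queue] else acc)
  rw [pvSkip_eq_bad]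
  cases hb : ((pvFL queue).2.items.any (fun pl =>
      (PySem.Dict.getD (PySem.Dict.mk dict_rule) pl.1 []).any (fun i =>
        decide (PySem.Dict.getD (pvFL queue).1 i (queue.length : Int) < pl.2)))) <;>
    cases bet <;> rfl
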